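-- pv_equiv track=rewrite | github.com/ClayDiGiorgio/InterlaceGenerator | interlace.py | pathToCoords
-- ===== SOURCE A (Python) =====
-- def follow(direction, location):
--     assert(type(direction) == str)
--
--     assert(type(location) == tuple)
--     assert(len(location) == 2)
--     assert(type(location[0]) == int and type(location[1]) == int)
--
--     # capital letters are followed the same way as
--     # lowercase letters
--     direction = direction.lower()
--
--     if(direction == "r"):
--         return (location[0]+1, location[1])
--     if(direction == "l"):
--         return (location[0]-1, location[1])
--     if(direction == "u"):
--         return (location[0], location[1]+1)
--     if(direction == "d"):
--         return (location[0], location[1]-1)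
--
--     return location
--
-- def pathToCoords(path):
--     assert(type(path) == str)
--
--     path = path.lower()
--     coords = list()
--
--     curr = (0,0)
--     coords.append(curr)
--     for d in path:
--         curr = follow(d, curr)
--         coords.append(curr)
--     return coords
-- ===== SOURCE B (Python) =====
-- def pathToCoords(path):
--     assert type(path) == str
--     p = path.lower()
--     # coordinate after i steps is determined by letter counts of the first i
--     # characters alone: x = #r - #l, y = #u - #d; no running state is kept
--     return [(p.count('r', 0, i) - p.count('l', 0, i),
--              p.count('u', 0, i) - p.count('d', 0, i))
--             for i in range(len(p) + 1)]
-- ===== Notes on version B (the rewrite author's own statement) =====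
-- stated objective: alternative
-- what changed: Replaces A's sequential loop threading a current position through a per-step if-chain helper with a stateless closed form: each coordinate is computed independently as (#r-#l, #u-#d) letter counts of the corresponding prefix.
import Mathlib
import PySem

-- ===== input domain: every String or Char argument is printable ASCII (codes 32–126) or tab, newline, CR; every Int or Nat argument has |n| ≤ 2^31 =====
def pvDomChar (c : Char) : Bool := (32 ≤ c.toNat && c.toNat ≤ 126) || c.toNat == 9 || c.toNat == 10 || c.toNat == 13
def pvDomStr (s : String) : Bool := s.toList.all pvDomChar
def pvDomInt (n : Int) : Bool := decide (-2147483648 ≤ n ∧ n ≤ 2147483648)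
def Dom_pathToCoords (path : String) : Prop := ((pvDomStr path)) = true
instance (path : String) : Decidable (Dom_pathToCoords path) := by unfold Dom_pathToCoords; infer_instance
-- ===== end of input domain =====

-- B replaces A's sequential position-threading loop by a stateless closed form:
-- coordinate i is (#r-#l, #u-#d) of the i-character prefix (objective: alternative).

-- ===== PORT A =====
-- helper `follow`: lowercases its one-char direction string and dispatches on it
def follow (direction : String) (location : Int × Int) : Int × Int :=
  let direction := PySem.Str.lower direction
  if direction = "r" then (location.1 + 1, location.2)
  else if direction = "l" then (location.1 - 1, location.2)
  else if direction = "u" then (location.1, location.2 + 1)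
  else if direction = "d" then (location.1, location.2 - 1)
  else location

-- the `for d in path` loop: threads `curr` and appends to `coords`
def pathToCoordsLoop (cs : List Char) (curr : Int × Int) (coords : List (Int × Int)) :
    List (Int × Int) :=
  match cs with
  | [] => coords
  | d :: rest =>
      let curr' := follow (String.singleton d) curr
      pathToCoordsLoop rest curr' (coords ++ [curr'])

def pathToCoords (path : String) : List (Int × Int) :=
  let path := PySem.Str.lower path
  pathToCoordsLoop path.toList (0, 0) ([] ++ [(0, 0)])

-- ===== PORT B =====
-- Source B: list comprehension over range(len(p)+1); entry i is built from the
-- bounded counts p.count(c, 0, i). PySem has no bounded Str.count, so it is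
-- ported by hand as the count of c in the slice p[0:i] — exact, since Python's
-- s.count(sub, start, end) counts occurrences within s[start:end] and sub is a
-- single character here
def pathToCoords_alt (path : String) : List (Int × Int) :=
  let cs := (PySem.Str.lower path).toList
  (PySem.List.pyRange 0 ((cs.length : Int) + 1) 1).map (fun i =>
    (((PySem.List.slice cs none (some i)).count 'r' : Int) -
       ((PySem.List.slice cs none (some i)).count 'l' : Int),
     ((PySem.List.slice cs none (some i)).count 'u' : Int) -
       ((PySem.List.slice cs none (some i)).count 'd' : Int)))

-- ===== PRECONDITION & SPEC =====
def Spec_pathToCoords (path : String) (out : List (Int × Int)) : Prop := out = pathToCoords_alt path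
instance (path : String) (out : List (Int × Int)) : Decidable (Spec_pathToCoords path out) := by unfold Spec_pathToCoords; infer_instance

-- ===== CLAIM (what is proved, stated in full; the proofs are below) =====
def Claim_equal_pathToCoords : Prop := ∀ (path : String), Dom_pathToCoords path → Spec_pathToCoords path (pathToCoords path)

-- ===== LEMMAS AND PROOFS =====

-- the step vector of one (already-lowercase) direction character
def delta (c : Char) : Int × Int :=
  if c = 'r' then (1, 0)
  else if c = 'l' then (-1, 0)
  else if c = 'u' then (0, 1)
  else if c = 'd' then (0, -1)
  else (0, 0)

-- prefix counts as a pair (#r - #l, #u - #d)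
def gcnt (cs : List Char) : Int × Int :=
  ((cs.count 'r' : Int) - (cs.count 'l' : Int),
   (cs.count 'u' : Int) - (cs.count 'd' : Int))

-- the common intermediate form: running sums of deltas
def scanD (x y : Int) (cs : List Char) : List (Int × Int) :=
  match cs with
  | [] => []
  | c :: rest => ((x + (delta c).1, y + (delta c).2)) ::
      scanD (x + (delta c).1) (y + (delta c).2) rest

theorem lowerChar_idem (c : Char) :
    PySem.Chars.lowerChar (PySem.Chars.lowerChar c) = PySem.Chars.lowerChar c := by
  unfold PySem.Chars.lowerChar PySem.Chars.isupper
  split_ifs with h1 h2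
  · exfalso
    simp only [Bool.and_eq_true, decide_eq_true_eq, Char.le_def] at h1 h2
    have h1a := UInt32.le_iff_toNat_le.mp h1.1
    have h1b := UInt32.le_iff_toNat_le.mp h1.2
    have h2a := UInt32.le_iff_toNat_le.mp h2.1
    have h2b := UInt32.le_iff_toNat_le.mp h2.2
    have hA : ('A' : Char).val.toNat = 65 := by decide
    have hZ : ('Z' : Char).val.toNat = 90 := by decide
    have hval : Nat.isValidChar (c.toNat + 32) := by
      left; unfold Char.toNat at *; omega
    have ht : (Char.ofNat (c.toNat + 32)).toNat = c.toNat + 32 := by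
      rw [Char.toNat_ofNat]; simp [hval]
    unfold Char.toNat at *
    omega
  · rfl
  · rfl

theorem singleton_eq_iff (c r : Char) : String.singleton c = String.singleton r ↔ c = r := by
  constructor
  · intro h
    have := congrArg String.toList h
    simpa using this
  · rintro rfl; rfl

theorem lower_singleton (c : Char) :
    PySem.Str.lower (String.singleton c) = String.singleton (PySem.Chars.lowerChar c) := by
  apply String.toList_inj.mp
  simp [PySem.Str.toList_lower, PySem.Chars.lower]

-- per-character fact: on an already-lowercase character, `follow` adds delta's vector
theorem follow_eq_delta (c : Char) (hc : PySem.Chars.lowerChar c = c) (curr : Int × Int) :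
    follow (String.singleton c) curr =
      (curr.1 + (delta c).1, curr.2 + (delta c).2) := by
  have hlow : PySem.Str.lower (String.singleton c) = String.singleton c := by
    rw [lower_singleton, hc]
  have hr' : ("r" : String) = String.singleton 'r' := rfl
  have hl' : ("l" : String) = String.singleton 'l' := rfl
  have hu' : ("u" : String) = String.singleton 'u' := rfl
  have hd' : ("d" : String) = String.singleton 'd' := rfl
  unfold follow delta
  rw [hlow, hr', hl', hu', hd']
  simp only [singleton_eq_iff]
  split_ifs with h1 h2 h3 h4 <;> simp [sub_eq_add_neg]

-- A's loop over an already-lowercase list is acc ++ the delta scan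
theorem loop_eq_scan (cs : List Char) (hcs : ∀ c ∈ cs, PySem.Chars.lowerChar c = c)
    (x y : Int) (acc : List (Int × Int)) :
    pathToCoordsLoop cs (x, y) acc = acc ++ scanD x y cs := by
  induction cs generalizing x y acc with
  | nil => simp [pathToCoordsLoop, scanD]
  | cons c rest ih =>
      have hstep := follow_eq_delta c (hcs c (List.mem_cons_self)) (x, y)
      rw [pathToCoordsLoop, hstep, scanD,
        ih (fun d hd => hcs d (List.mem_cons_of_mem _ hd))]
      simp

-- prefix counts are additive over cons, by delta's vector
theorem gcnt_cons (c : Char) (t : List Char) :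
    gcnt (c :: t) = ((delta c).1 + (gcnt t).1, (delta c).2 + (gcnt t).2) := by
  by_cases h1 : c = 'r'
  · subst h1; simp [gcnt, delta, Prod.ext_iff]; ring
  by_cases h2 : c = 'l'
  · subst h2; simp [gcnt, delta, Prod.ext_iff]; ring
  by_cases h3 : c = 'u'
  · subst h3; simp [gcnt, delta, Prod.ext_iff]; ring
  by_cases h4 : c = 'd'
  · subst h4; simp [gcnt, delta, Prod.ext_iff]; ring
  · simp [gcnt, delta, h1, h2, h3, h4]

-- the delta scan is the closed form over prefixes
theorem scan_eq_counts (cs : List Char) (x y : Int) :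
    scanD x y cs = (List.range cs.length).map
      (fun k => (x + (gcnt (cs.take (k + 1))).1, y + (gcnt (cs.take (k + 1))).2)) := by
  induction cs generalizing x y with
  | nil => simp [scanD]
  | cons c t ih =>
      rw [scanD, ih]
      simp only [List.length_cons, List.range_succ_eq_map, List.map_cons, List.map_map]
      congr 1
      · have h : gcnt [c] = delta c := by rw [gcnt_cons]; simp [gcnt]
        simp [h]
      · apply List.map_congr_left
        intro k _
        simp only [Function.comp_apply, List.take_succ_cons, gcnt_cons, Prod.mk.injEq]
        constructor <;> ring

-- B's comprehension, zeta-reduced: a map of gcnt over the prefixes of the lowered list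
theorem alt_eq (path : String) :
    pathToCoords_alt path =
      (List.range ((PySem.Str.lower path).toList.length + 1)).map
        (fun k => gcnt ((PySem.Str.lower path).toList.take k)) := by
  show (PySem.List.pyRange 0 (((PySem.Str.lower path).toList.length : Int) + 1) 1).map (fun i =>
      (((PySem.List.slice (PySem.Str.lower path).toList none (some i)).count 'r' : Int) -
         ((PySem.List.slice (PySem.Str.lower path).toList none (some i)).count 'l' : Int),
       ((PySem.List.slice (PySem.Str.lower path).toList none (some i)).count 'u' : Int) -
         ((PySem.List.slice (PySem.Str.lower path).toList none (some i)).count 'd' : Int))) = _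
  rw [PySem.List.pyRange_one]
  have hn : ((((PySem.Str.lower path).toList.length : Int) + 1 - 0)).toNat =
      (PySem.Str.lower path).toList.length + 1 := by omega
  rw [hn, List.map_map]
  apply List.map_congr_left
  intro k _
  have hz : (0 : Int) + (k : Int) = ((k : Nat) : Int) := by ring
  simp only [Function.comp_apply, hz, PySem.List.slice_to_natCast]
  simp [gcnt]

-- ===== VERDICT (by name: the statement is the Claim_ definition above) =====
theorem pathToCoords_spec : Claim_equal_pathToCoords := by
  intro path _
  unfold Spec_pathToCoords pathToCoords
  have hlow : ∀ c ∈ (PySem.Str.lower path).toList, PySem.Chars.lowerChar c = c := by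
    intro c hc
    rw [PySem.Str.toList_lower] at hc
    simp only [PySem.Chars.lower, List.mem_map] at hc
    obtain ⟨d, _, rfl⟩ := hc
    exact lowerChar_idem d
  show pathToCoordsLoop (PySem.Str.lower path).toList (0, 0) ([] ++ [(0, 0)]) = _
  rw [loop_eq_scan _ hlow, scan_eq_counts, alt_eq,
      List.range_succ_eq_map, List.map_cons, List.map_map]
  simp only [List.nil_append, List.singleton_append]
  congr 1
  apply List.map_congr_left
  intro k _
  simp [gcnt]
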